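-- pv_equiv track=rewrite | github.com/Dr0x3525/Proyecto-final-programacion | ejercicios_parciales/ejercicios_recuperacion_parcial_1/ejercicio_2.py | encontrar_penultimo_primo
-- ===== SOURCE A (Python) =====
-- def determinar_ser_primo(numero):
--     if numero <= 1:
--         return False
--     else:
--         if numero == 2:
--             return True
--         else:
--             for i in range(2,numero-1):
--                 if numero % i == 0:
--                     return False
--             return True
--
-- def encontrar_penultimo_primo(vector):
--     penultimo_primo = None
--     contador_primos = 0
--     for indice in range (len(vector)-1,0,-1):
--         if determinar_ser_primo(vector[indice]):
--             contador_primos += 1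
--             if contador_primos == 2:
--                 penultimo_primo = vector[indice]
--                 return indice,penultimo_primo
--     return None,None
-- ===== SOURCE B (Python) =====
-- def _es_primo(n):
--     if n < 2:
--         return False
--     if n % 2 == 0:
--         return n == 2
--     i = 3
--     while i * i <= n:
--         if n % i == 0:
--             return False
--         i += 2
--     return True
--
-- def encontrar_penultimo_primo(vector):
--     primos = [(i, v) for i, v in enumerate(vector) if _es_primo(v)]
--     if len(primos) >= 2:
--         return primos[-2]
--     return None, None
-- ===== Notes on version B (the rewrite author's own statement) =====
-- stated objective: alternative
-- what changed: B tests primality by trial division bounded by sqrt(n) (odd candidates after an evenness check) instead of A's scan of every divisor up to n-2, and finds the penultimate prime by one forward pass that collects the prime (index, value) pairs and takes the last-but-one, instead of A's backward index loop with a counter; B trades A's early exit from the backward scan for the cheaper per-element test; B also examines index 0, which A's range(len-1,0,-1) skips (declared as D_).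
-- intended difference: On vectors whose first element is prime and whose remaining elements contain exactly one prime, A returns (None, None) because its loop range(len(vector)-1, 0, -1) never examines index 0, while B returns (0, vector[0]), the genuine second prime counted from the end. — e.g. on encontrar_penultimo_primo([3, 4, 5]): A returns (none, none), B returns (some 0, some 3)
import Mathlib
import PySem

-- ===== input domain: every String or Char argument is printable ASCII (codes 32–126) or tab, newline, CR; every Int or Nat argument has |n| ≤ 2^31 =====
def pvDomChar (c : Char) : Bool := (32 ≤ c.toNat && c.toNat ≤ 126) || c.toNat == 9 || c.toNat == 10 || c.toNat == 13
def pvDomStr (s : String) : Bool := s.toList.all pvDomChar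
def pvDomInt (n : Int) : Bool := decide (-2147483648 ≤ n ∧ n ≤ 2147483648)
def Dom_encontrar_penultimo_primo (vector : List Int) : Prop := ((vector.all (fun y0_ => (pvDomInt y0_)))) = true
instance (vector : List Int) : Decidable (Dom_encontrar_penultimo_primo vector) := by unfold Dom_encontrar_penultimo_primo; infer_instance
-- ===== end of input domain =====

-- B replaces A's full trial division (divisors up to numero-2) by trial division up to √numero,
-- and replaces the backward counting scan by one forward pass collecting the prime positions and
-- taking the last-but-one; B also examines index 0, which A's loop range(len-1, 0, -1) skips (see D_).

-- ===== PORT A =====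
-- 'for i in range(2, numero-1): if numero % i == 0: return False / return True', as a counting
-- loop (Python's range is lazy and the loop may exit at the first divisor, so the port must not
-- materialise the range); fuel = (numero-3).toNat is the exact number of values range(2, numero-1) yields.
def detA_loop (numero : Int) : Nat → Int → Bool
  | 0, _ => true
  | fuel + 1, i =>
    if i < numero - 1 then
      if PySem.Int.mod numero i == 0 then false
      else detA_loop numero fuel (i + 1)
    else true

def determinar_ser_primo (numero : Int) : Bool :=
  if numero ≤ 1 then false
  else if numero == 2 then true
  else detA_loop numero (numero - 3).toNat 2

-- the 'for indice in range(len(vector)-1, 0, -1)' loop with its early return and counter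
def buscarA (vector : List Int) : List Int → Int → Option Int × Option Int
  | [], _ => (none, none)
  | indice :: rest, contador =>
    match PySem.List.pyGet? vector indice with
    | none => (none, none)   -- unreachable: every index produced by the range is in bounds
    | some x =>
      if determinar_ser_primo x then
        if contador + 1 == 2 then (some indice, some x)
        else buscarA vector rest (contador + 1)
      else buscarA vector rest contador

def encontrar_penultimo_primo (vector : List Int) : Option Int × Option Int :=
  buscarA vector (PySem.List.pyRange ((vector.length : Int) - 1) 0 (-1)) 0

-- ===== PORT B =====
-- 'while i * i <= n: …; i += 2', with structural fuel; fuel = n.toNat + 1 is exact: the loop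
-- body runs only while i*i ≤ n (hence i ≤ n), and i grows by 2 each step starting at 3,
-- so at fuel 0 the condition i*i ≤ n is already false and 'true' is what the while loop returns.
def es_primo_loop (n : Int) : Nat → Int → Bool
  | 0, _ => true
  | fuel + 1, i =>
    if i * i ≤ n then
      if PySem.Int.mod n i == 0 then false
      else es_primo_loop n fuel (i + 2)
    else true

def es_primo (n : Int) : Bool :=
  if n < 2 then false
  else if PySem.Int.mod n 2 == 0 then n == 2
  else es_primo_loop n (n.toNat + 1) 3

def encontrar_penultimo_primo_alt (vector : List Int) : Option Int × Option Int :=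
  let primos := (PySem.List.enumerate vector).filter (fun p => es_primo p.2)
  if 2 ≤ primos.length then
    match PySem.List.pyGet? primos (-2) with
    | some p => (some p.1, some p.2)
    | none => (none, none)   -- unreachable: len(primos) >= 2
  else (none, none)

-- ===== PRECONDITION & SPEC =====
-- the primality predicate, as a closed-form condition (used by D_ below and by the proofs)
def primeRef (n : Int) : Bool := decide (2 ≤ n ∧ Nat.Prime n.toNat)

-- On vectors whose first element is prime and whose remaining elements contain exactly one prime,
-- A returns (None, None) because its loop range(len(vector)-1, 0, -1) never examines index 0,
-- while B returns (0, vector[0]) — the genuine second prime counted from the end.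
def D_encontrar_penultimo_primo (vector : List Int) : Prop :=
  vector ≠ [] ∧ primeRef vector.headI = true ∧ vector.tail.countP primeRef = 1
instance (vector : List Int) : Decidable (D_encontrar_penultimo_primo vector) := by
  unfold D_encontrar_penultimo_primo; infer_instance

def Spec_encontrar_penultimo_primo (vector : List Int) (out : Option Int × Option Int) : Prop :=
  ¬ D_encontrar_penultimo_primo vector → out = encontrar_penultimo_primo_alt vector
instance (vector : List Int) (out : Option Int × Option Int) : Decidable (Spec_encontrar_penultimo_primo vector out) := by
  unfold Spec_encontrar_penultimo_primo; infer_instance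

def pvDiffWitness_encontrar_penultimo_primo : List Int := [3, 4, 5]
def pvDiffWitnessOut_encontrar_penultimo_primo : (Option Int × Option Int) × (Option Int × Option Int) :=
  ((none, none), (some 0, some 3))

-- ===== CLAIM (what is proved, stated in full; the proofs are below) =====
def Claim_unchanged_encontrar_penultimo_primo : Prop := ∀ (vector : List Int), Dom_encontrar_penultimo_primo vector → Spec_encontrar_penultimo_primo vector (encontrar_penultimo_primo vector)
def Claim_changed_encontrar_penultimo_primo : Prop := Dom_encontrar_penultimo_primo (pvDiffWitness_encontrar_penultimo_primo) ∧ D_encontrar_penultimo_primo (pvDiffWitness_encontrar_penultimo_primo) ∧ encontrar_penultimo_primo (pvDiffWitness_encontrar_penultimo_primo) = pvDiffWitnessOut_encontrar_penultimo_primo.1 ∧ encontrar_penultimo_primo_alt (pvDiffWitness_encontrar_penultimo_primo) = pvDiffWitnessOut_encontrar_penultimo_primo.2 ∧ pvDiffWitnessOut_encontrar_penultimo_primo.1 ≠ pvDiffWitnessOut_encontrar_penultimo_primo.2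
def Claim_exact_encontrar_penultimo_primo : Prop := ∀ (vector : List Int), Dom_encontrar_penultimo_primo vector → D_encontrar_penultimo_primo vector → encontrar_penultimo_primo vector ≠ encontrar_penultimo_primo_alt vector

-- ===== LEMMAS AND PROOFS =====

-- A's primality test equals the reference predicate
lemma detA_loop_iff (n : Int) : ∀ (fuel : Nat) (i : Int), n - 1 ≤ i + fuel →
    (detA_loop n fuel i = true ↔ ∀ k : Nat, i + k < n - 1 → ¬ ((i + k) ∣ n)) := by
  intro fuel
  induction fuel with
  | zero =>
    intro i hf
    simp only [detA_loop, true_iff]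
    intro k hk
    exfalso
    have hk0 : (0:Int) ≤ (k:Int) := by positivity
    push_cast at hf
    omega
  | succ fuel ih =>
    intro i hf
    simp only [detA_loop]
    by_cases hc : i < n - 1
    · by_cases hd : PySem.Int.mod n i = 0
      · have hdvd : i ∣ n := (PySem.Int.mod_eq_zero_iff_dvd n i).mp hd
        simp only [hc, if_true, hd, beq_self_eq_true, if_true]
        constructor
        · intro h; cases h
        · intro h
          exfalso
          have := h 0
          simp only [Nat.cast_zero, add_zero] at this
          exact this hc hdvd
      · have hnd : ¬ (i ∣ n) := fun hdvd => hd ((PySem.Int.mod_eq_zero_iff_dvd n i).mpr hdvd)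
        have hd' : (PySem.Int.mod n i == 0) = false := by simpa using hd
        simp only [hc, if_true, hd', Bool.false_eq_true, if_false]
        rw [ih (i + 1) (by push_cast at hf ⊢; omega)]
        constructor
        · intro h k
          cases k with
          | zero =>
            simp only [Nat.cast_zero, add_zero]
            intro _
            exact hnd
          | succ k =>
            have harg : i + (((k:Nat) + 1 : Nat) : Int) = (i + 1) + (k:Int) := by push_cast; ring
            rw [harg]
            exact h k
        · intro h k
          have harg : (i + 1) + (k:Int) = i + ((k:Int) + 1) := by ring
          rw [harg]
          have := h (k + 1)
          push_cast at this
          exact this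
    · simp only [hc, if_false, true_iff]
      intro k hk
      exfalso
      have hk0 : (0:Int) ≤ (k:Int) := by positivity
      omega

-- A's primality test equals the reference predicate
lemma detA_eq (n : Int) : determinar_ser_primo n = primeRef n := by
  unfold determinar_ser_primo primeRef
  by_cases h1 : n ≤ 1
  · have hnp : ¬ (2 ≤ n ∧ Nat.Prime n.toNat) := fun h => by omega
    simp [h1, hnp]
  · by_cases h2 : n = 2
    · subst h2; decide
    · have h3 : 3 ≤ n := by omega
      have hp : ((n.toNat : Int)) = n := Int.toNat_of_nonneg (by omega)
      simp only [h1, if_false, h2, beq_iff_eq, if_false]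
      rw [Bool.eq_iff_iff]
      rw [detA_loop_iff n (n - 3).toNat 2 (by omega)]
      simp only [decide_eq_true_eq]
      constructor
      · intro h
        refine ⟨by omega, Nat.prime_def_lt.mpr ⟨by omega, ?_⟩⟩
        intro m hmlt hmdvd
        by_contra hne
        have hm0 : m ≠ 0 := by
          rintro rfl
          have := Nat.eq_zero_of_zero_dvd hmdvd
          omega
        have hm2 : 2 ≤ m := by omega
        have hdvdI : (m : Int) ∣ n := by
          rw [← hp]; exact_mod_cast hmdvd
        by_cases hsm : (m : Int) < n - 1
        · have hcast : (2:Int) + ((m - 2 : ℕ) : Int) = (m : Int) := by omega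
          have := h (m - 2)
          rw [hcast] at this
          exact this hsm hdvdI
        · -- then m = n - 1, and m ∣ n forces m ∣ 1
          have hmeq : m = n.toNat - 1 := by omega
          have hd1 : m ∣ 1 := by
            have := Nat.dvd_sub hmdvd (dvd_refl m)
            rwa [show n.toNat - m = 1 by omega] at this
          have := Nat.dvd_one.mp hd1
          omega
      · rintro ⟨-, hpr⟩ k hin hdvd
        have hcast : ((2 + k : ℕ) : Int) = 2 + (k : Int) := by push_cast; ring
        have hdvdN : (2 + k) ∣ n.toNat := by
          rw [← hp, ← hcast] at hdvd
          exact_mod_cast hdvd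
        rcases hpr.eq_one_or_self_of_dvd _ hdvdN with h | h
        · omega
        · omega

-- B's while-loop, characterised
lemma loop_true_iff (n : Int) : ∀ (fuel : Nat) (i : Int), 1 ≤ i → n < i + 2 * fuel →
    (es_primo_loop n fuel i = true ↔ ∀ k : Nat, (i + 2 * k) * (i + 2 * k) ≤ n → ¬ ((i + 2 * k) ∣ n)) := by
  intro fuel
  induction fuel with
  | zero =>
    intro i hi hf
    simp only [es_primo_loop, true_iff]
    intro k hk
    exfalso
    have hk0 : (0:Int) ≤ (k:Int) := by positivity
    push_cast at hf
    nlinarith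
  | succ fuel ih =>
    intro i hi hf
    simp only [es_primo_loop]
    by_cases hc : i * i ≤ n
    · by_cases hd : PySem.Int.mod n i = 0
      · have hdvd : i ∣ n := (PySem.Int.mod_eq_zero_iff_dvd n i).mp hd
        simp only [hc, if_true, hd, beq_self_eq_true, if_true]
        constructor
        · intro h; cases h
        · intro h
          exfalso
          have := h 0
          simp only [Nat.cast_zero, mul_zero, add_zero] at this
          exact this hc hdvd
      · have hnd : ¬ (i ∣ n) := fun hdvd => hd ((PySem.Int.mod_eq_zero_iff_dvd n i).mpr hdvd)
        have hd' : (PySem.Int.mod n i == 0) = false := by simpa using hd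
        simp only [hc, if_true, hd', Bool.false_eq_true, if_false]
        rw [ih (i + 2) (by omega) (by push_cast at hf ⊢; omega)]
        constructor
        · intro h k
          cases k with
          | zero =>
            simp only [Nat.cast_zero, mul_zero, add_zero]
            intro _
            exact hnd
          | succ k =>
            have harg : i + 2 * (((k:Nat) + 1 : Nat) : Int) = (i + 2) + 2 * (k:Int) := by push_cast; ring
            rw [harg]
            have := h k
            push_cast at this
            exact this
        · intro h k
          have harg : (i + 2) + 2 * (k:Int) = i + 2 * ((k:Int) + 1) := by ring
          rw [harg]
          have := h (k + 1)
          push_cast at this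
          exact this
    · simp only [hc, if_false, true_iff]
      intro k hk
      exfalso
      have hk0 : (0:Int) ≤ (k:Int) := by positivity
      nlinarith

-- B's primality test equals the reference predicate
lemma esB_eq (n : Int) : es_primo n = primeRef n := by
  unfold es_primo primeRef
  by_cases h2 : n < 2
  · have hnp : ¬ (2 ≤ n ∧ Nat.Prime n.toNat) := fun h => by omega
    simp [h2, hnp]
  · by_cases hev : PySem.Int.mod n 2 = 0
    · have hdvd : (2:Int) ∣ n := (PySem.Int.mod_eq_zero_iff_dvd n 2).mp hev
      simp only [h2, if_false, hev, beq_self_eq_true, if_true]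
      by_cases h2' : n = 2
      · subst h2'; decide
      · have h4 : 4 ≤ n := by
          obtain ⟨t, rfl⟩ := hdvd
          omega
        rw [Bool.eq_iff_iff]
        simp only [beq_iff_eq, decide_eq_true_eq]
        constructor
        · intro h; omega
        · rintro ⟨-, hpr⟩
          exfalso
          have hp : ((n.toNat : Int)) = n := Int.toNat_of_nonneg (by omega)
          have hdN : 2 ∣ n.toNat := by
            rw [← hp] at hdvd; exact_mod_cast hdvd
          rcases hpr.eq_one_or_self_of_dvd _ hdN with h | h <;> omega
    · have hodd : ¬ ((2:Int) ∣ n) := fun h => hev ((PySem.Int.mod_eq_zero_iff_dvd n 2).mpr h)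
      have hn2 : n ≠ 2 := by rintro rfl; exact hodd ⟨1, rfl⟩
      have h3 : 3 ≤ n := by omega
      have hp : ((n.toNat : Int)) = n := Int.toNat_of_nonneg (by omega)
      have hev' : (PySem.Int.mod n 2 == 0) = false := by simpa using hev
      simp only [h2, if_false, hev', Bool.false_eq_true, if_false]
      rw [Bool.eq_iff_iff]
      rw [loop_true_iff n (n.toNat + 1) 3 (by omega) (by push_cast; omega)]
      simp only [decide_eq_true_eq]
      constructor
      · intro h
        refine ⟨by omega, Nat.prime_def_le_sqrt.mpr ⟨by omega, ?_⟩⟩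
        intro m hm2 hms hmdvd
        have hmm : m * m ≤ n.toNat := Nat.le_sqrt.mp hms
        rcases Nat.even_or_odd m with he | ho
        · -- even divisor of the odd n: impossible
          apply hodd
          have h2N : 2 ∣ n.toNat := dvd_trans he.two_dvd hmdvd
          rw [← hp]; exact_mod_cast h2N
        · have hm1 : m % 2 = 1 := Nat.odd_iff.mp ho
          have hm3 : 3 ≤ m := by omega
          obtain ⟨k, hk⟩ : ∃ k, m = 3 + 2 * k := ⟨(m - 3) / 2, by omega⟩
          have hcast : ((m : ℕ) : Int) = 3 + 2 * (k : Int) := by rw [hk]; push_cast; ring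
          have hle : (3 + 2*(k:Int)) * (3 + 2*(k:Int)) ≤ n := by
            rw [← hcast, ← hp]; exact_mod_cast hmm
          have hdv : (3 + 2*(k:Int)) ∣ n := by
            rw [← hcast, ← hp]; exact_mod_cast hmdvd
          exact h k hle hdv
      · rintro ⟨-, hpr⟩ k hk hdvd
        set m : ℕ := 3 + 2 * k with hm
        have hcast : ((m : ℕ) : Int) = 3 + 2 * (k : Int) := by rw [hm]; push_cast; ring
        have hdN : m ∣ n.toNat := by
          rw [← hp, ← hcast] at hdvd
          exact_mod_cast hdvd
        have hmm : m * m ≤ n.toNat := by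
          rw [← hp, ← hcast] at hk
          exact_mod_cast hk
        rcases hpr.eq_one_or_self_of_dvd _ hdN with h | h
        · omega
        · have h3' : 3 ≤ n.toNat := by omega
          nlinarith

-- second element of a list of (index, value) pairs, as both final answers produce it
def pick2 (l : List (Int × Int)) : Option Int × Option Int :=
  match l[1]? with
  | some p => (some p.1, some p.2)
  | none => (none, none)

lemma buscar_one (v : List Int) (L : List Int) (h : ∀ i ∈ L, 0 ≤ i ∧ i < (v.length : Int)) :
    buscarA v L 1 =
      match (L.filter (fun i => primeRef (PySem.List.pyGetD v i 0))) with
      | [] => (none, none)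
      | j :: _ => (some j, some (PySem.List.pyGetD v j 0)) := by
  induction L with
  | nil => simp [buscarA]
  | cons i L ih =>
    obtain ⟨hi0, hil⟩ := h i (List.mem_cons_self ..)
    rw [buscarA, PySem.List.pyGet?_eq_some_getElem v hi0 hil]
    dsimp only
    rw [detA_eq]
    have hg : PySem.List.pyGetD v i 0 = v[i.toNat] := PySem.List.pyGetD_eq_getElem v 0 hi0 hil
    rw [List.filter_cons]
    by_cases hpr : primeRef v[i.toNat]
    · simp [hg, hpr]
    · simp only [hg, hpr, Bool.false_eq_true, if_false]
      exact ih (fun j hj => h j (List.mem_cons_of_mem _ hj))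

lemma buscar_zero (v : List Int) (L : List Int) (h : ∀ i ∈ L, 0 ≤ i ∧ i < (v.length : Int)) :
    buscarA v L 0 =
      pick2 ((L.filter (fun i => primeRef (PySem.List.pyGetD v i 0))).map
               (fun j => (j, PySem.List.pyGetD v j 0))) := by
  induction L with
  | nil => simp [buscarA, pick2]
  | cons i L ih =>
    obtain ⟨hi0, hil⟩ := h i (List.mem_cons_self ..)
    rw [buscarA, PySem.List.pyGet?_eq_some_getElem v hi0 hil]
    dsimp only
    rw [detA_eq]
    have hg : PySem.List.pyGetD v i 0 = v[i.toNat] := PySem.List.pyGetD_eq_getElem v 0 hi0 hil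
    rw [List.filter_cons]
    by_cases hpr : primeRef v[i.toNat]
    · simp only [hg, hpr, if_true]
      norm_num
      rw [buscar_one v L (fun j hj => h j (List.mem_cons_of_mem _ hj))]
      cases hF : L.filter (fun i => primeRef (PySem.List.pyGetD v i 0)) with
      | nil => simp [pick2]
      | cons j F' => simp [pick2]
    · simp only [hg, hpr, Bool.false_eq_true, if_false]
      exact ih (fun j hj => h j (List.mem_cons_of_mem _ hj))

-- B's port, reduced to pick2 of the reversed prime-pair list
lemma alt_eq_pick2 (v : List Int) :
    encontrar_penultimo_primo_alt v =
      pick2 (((PySem.List.enumerate v).filter (fun p => primeRef p.2)).reverse) := by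
  unfold encontrar_penultimo_primo_alt
  simp only [esB_eq]
  set l := (PySem.List.enumerate v).filter (fun p => primeRef p.2) with hl
  by_cases h2 : 2 ≤ l.length
  · simp only [h2, if_true]
    rw [PySem.List.pyGet?_neg_ofNat l 2 (by omega) (by omega)]
    rw [List.getElem?_eq_getElem (by omega)]
    unfold pick2
    rw [List.getElem?_reverse (by omega)]
    rw [show l.length - 1 - 1 = l.length - 2 from by omega]
    rw [List.getElem?_eq_getElem (by omega)]
  · simp only [h2, if_false]
    unfold pick2
    rw [List.getElem?_eq_none (by simp; omega)]

-- A's port, reduced to pick2 of the reversed prime-pair list over indices 1..n-1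
lemma a_eq_pick2 (v : List Int) :
    encontrar_penultimo_primo v =
      pick2 ((((PySem.List.pyRange 1 (v.length : Int) 1).filter
                 (fun i => primeRef (PySem.List.pyGetD v i 0))).map
                (fun j => (j, PySem.List.pyGetD v j 0))).reverse) := by
  unfold encontrar_penultimo_primo
  rw [PySem.List.pyRange_neg_one_eq_reverse]
  have he : ((v.length : Int) - 1 + 1) = (v.length : Int) := by ring
  rw [he]
  rw [show ((0:Int) + 1) = 1 from by norm_num]
  rw [buscar_zero v _ (fun i hi => by
    rw [List.mem_reverse, PySem.List.mem_pyRange_one] at hi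
    omega)]
  rw [List.filter_reverse, List.map_reverse]

-- the two pick2 presentations agree on every non-degenerate vector (the whole content of the claim)
lemma core_eq (x : Int) (rest : List Int)
    (hnd : ¬ (primeRef x = true ∧ rest.countP primeRef = 1)) :
    pick2 ((((PySem.List.pyRange 1 ((x :: rest).length : Int) 1).filter
               (fun i => primeRef (PySem.List.pyGetD (x :: rest) i 0))).map
              (fun j => (j, PySem.List.pyGetD (x :: rest) j 0))).reverse)
      = pick2 (((PySem.List.enumerate (x :: rest)).filter (fun p => primeRef p.2)).reverse) := by
  rw [PySem.List.enumerate_eq_map_pyRange (x :: rest) 0, PySem.List.len_eq]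
  rw [PySem.List.pyRange_one_cons (a := 0) (b := (((x :: rest).length : Nat) : Int)) (by simp)]
  rw [show ((0:Int) + 1) = 1 from by norm_num]
  rw [List.map_cons, List.filter_cons]
  rw [List.filter_map]
  have hcomp : ((fun p : Int × Int => primeRef p.2) ∘ (fun j => (j, PySem.List.pyGetD (x :: rest) j 0)))
      = fun i => primeRef (PySem.List.pyGetD (x :: rest) i 0) := rfl
  rw [hcomp]
  rw [PySem.List.pyGetD_zero_cons]
  set Fp := ((PySem.List.pyRange 1 (((x :: rest).length : Nat) : Int) 1).filter
               (fun i => primeRef (PySem.List.pyGetD (x :: rest) i 0))).map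
              (fun j => (j, PySem.List.pyGetD (x :: rest) j 0)) with hFp
  by_cases hx : primeRef x
  · have hmap : (PySem.List.pyRange 1 (((x :: rest).length : Nat) : Int) 1).map
        (fun j => PySem.List.pyGetD (x :: rest) j 0) = rest := by
      have := PySem.List.map_pyGetD_pyRange' (x :: rest) 0 (a := 1) (by omega)
      simpa using this
    have hFlen : Fp.length = rest.countP primeRef := by
      have hc2 : (PySem.List.pyRange 1 (((x :: rest).length : Nat) : Int) 1).countP
              (fun i => primeRef (PySem.List.pyGetD (x :: rest) i 0))
          = rest.countP primeRef := by
        conv_rhs => rw [← hmap]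
        rw [List.countP_map]
        rfl
      rw [hFp, List.length_map, ← List.countP_eq_length_filter, hc2]
    have hne1 : Fp.length ≠ 1 := by
      rw [hFlen]
      intro hc
      exact hnd ⟨hx, hc⟩
    simp only [hx, if_true]
    cases hFpc : Fp with
    | nil => simp [pick2]
    | cons p0 Fp' =>
      have hlen2 : 2 ≤ Fp.length := by
        rw [hFpc]; rw [hFpc] at hne1
        simp at hne1 ⊢
        cases Fp' with
        | nil => simp at hne1
        | cons a b => simp
      rw [← hFpc, List.reverse_cons]
      unfold pick2
      rw [List.getElem?_append_left (by simp; omega)]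
  · simp only [hx, Bool.false_eq_true, if_false]

-- ===== VERDICT (by name: the statement is the Claim_ definition above) =====
theorem encontrar_penultimo_primo_spec : Claim_unchanged_encontrar_penultimo_primo := by
  intro v _ hnD
  rw [a_eq_pick2, alt_eq_pick2]
  cases v with
  | nil =>
    rw [PySem.List.enumerate_nil, PySem.List.pyRange_one_eq_nil (by simp)]
    simp
  | cons x rest =>
    apply core_eq
    intro ⟨hx, hc⟩
    exact hnD ⟨by simp, by simpa using hx, by simpa using hc⟩

theorem encontrar_penultimo_primo_changed : Claim_changed_encontrar_penultimo_primo := by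
  unfold Claim_changed_encontrar_penultimo_primo; decide

theorem encontrar_penultimo_primo_tight : Claim_exact_encontrar_penultimo_primo := by
  intro v _ hD
  obtain ⟨hne, hx, hcnt⟩ := hD
  cases v with
  | nil => exact absurd rfl hne
  | cons x rest =>
    rw [a_eq_pick2, alt_eq_pick2]
    rw [PySem.List.enumerate_eq_map_pyRange (x :: rest) 0, PySem.List.len_eq]
    rw [PySem.List.pyRange_one_cons (a := 0) (b := (((x :: rest).length : Nat) : Int)) (by simp)]
    rw [show ((0:Int) + 1) = 1 from by norm_num]
    rw [List.map_cons, List.filter_cons]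
    rw [List.filter_map]
    have hcomp : ((fun p : Int × Int => primeRef p.2) ∘ (fun j => (j, PySem.List.pyGetD (x :: rest) j 0)))
        = fun i => primeRef (PySem.List.pyGetD (x :: rest) i 0) := rfl
    rw [hcomp]
    rw [PySem.List.pyGetD_zero_cons]
    simp only [List.headI_cons] at hx
    simp only [List.tail_cons] at hcnt
    set Fp := ((PySem.List.pyRange 1 (((x :: rest).length : Nat) : Int) 1).filter
                 (fun i => primeRef (PySem.List.pyGetD (x :: rest) i 0))).map
                (fun j => (j, PySem.List.pyGetD (x :: rest) j 0)) with hFp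
    have hmap : (PySem.List.pyRange 1 (((x :: rest).length : Nat) : Int) 1).map
        (fun j => PySem.List.pyGetD (x :: rest) j 0) = rest := by
      have := PySem.List.map_pyGetD_pyRange' (x :: rest) 0 (a := 1) (by omega)
      simpa using this
    have hFlen : Fp.length = 1 := by
      have hc2 : (PySem.List.pyRange 1 (((x :: rest).length : Nat) : Int) 1).countP
              (fun i => primeRef (PySem.List.pyGetD (x :: rest) i 0))
          = rest.countP primeRef := by
        conv_rhs => rw [← hmap]
        rw [List.countP_map]
        rfl
      rw [hFp, List.length_map, ← List.countP_eq_length_filter, hc2, hcnt]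
    obtain ⟨p, hp⟩ := List.length_eq_one_iff.mp hFlen
    rw [hp]
    simp [hx, pick2]
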